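-- pv_equiv track=rewrite | github.com/Tipulidae/mim | mim/massage/sk1718.py | last_in_clusters
-- ===== SOURCE A (Python) =====
-- def last_in_clusters(seq, gap=30):
--     # Given an input sequence of numbers, I want to return a
--     # sorted sub-sequence such that each number is included at most once, and
--     # the gap between the numbers is at least __gap__ large. Furthermore,
--     # in a sub-sequence of numbers where the gap is smaller than __gap__,
--     # I want to keep only the last number.
--
--     # In other words, I want to first organize a sequence into clusters
--     # based on their distances (gap), and then return the last number in each
--     # cluster.
--     if len(seq) == 0:
--         return seq
--
--     seq = sorted(set(seq))
--     prev = seq[0]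
--     output = []
--     for x in seq:
--         if x - prev > gap:
--             output.append(prev)
--
--         prev = x
--     output.append(seq[-1])
--     return output
-- ===== SOURCE B (Python) =====
-- def last_in_clusters(seq, gap=30):
--     # Two staged passes: group the sorted-unique numbers into explicit
--     # clusters (a new cluster starts when the step from the cluster's last
--     # element exceeds gap), then reduce each cluster to its last element.
--     if len(seq) == 0:
--         return seq
--     s = sorted(set(seq))
--     clusters = [[s[0]]]
--     for x in s[1:]:
--         if x - clusters[-1][-1] > gap:
--             clusters.append([x])
--         else:
--             clusters[-1].append(x)
--     return [c[-1] for c in clusters]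
-- ===== Notes on version B (the rewrite author's own statement) =====
-- stated objective: alternative
-- what changed: A's single stateful pass that emits prev whenever the gap breaks is replaced by two staged passes: first build the clusters explicitly as lists (new cluster when the step from the current cluster's last element exceeds gap), then map each cluster to its last element.
-- intended difference: On nonempty seq with gap < 0, A's loop compares the first element with itself (0 > gap fires) and so returns the smallest element twice ([s0, s0, ...]); B returns each cluster's last element once ([s0, ...]), which is intended since the docstring promises each number is included at most once. — e.g. on last_in_clusters([5], -1): A returns [5, 5], B returns [5]
import Mathlib
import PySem

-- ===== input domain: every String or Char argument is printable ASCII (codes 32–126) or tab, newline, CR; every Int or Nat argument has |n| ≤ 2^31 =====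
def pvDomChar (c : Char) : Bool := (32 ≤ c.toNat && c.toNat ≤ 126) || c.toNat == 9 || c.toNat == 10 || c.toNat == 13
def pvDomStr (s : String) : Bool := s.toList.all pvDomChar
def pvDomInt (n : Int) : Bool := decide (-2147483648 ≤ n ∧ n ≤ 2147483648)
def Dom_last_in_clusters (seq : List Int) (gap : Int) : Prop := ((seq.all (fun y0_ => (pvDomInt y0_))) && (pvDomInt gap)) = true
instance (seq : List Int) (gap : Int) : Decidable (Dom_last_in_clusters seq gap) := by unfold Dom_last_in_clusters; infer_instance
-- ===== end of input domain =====

-- B replaces A's emit-prev-on-break single pass by two staged passes (group into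
-- explicit clusters, then take each cluster's last element); objective: alternative.

-- ===== PORT A =====
-- A: dedup+sort, then one pass keeping `prev` and appending it when the gap breaks,
-- finally appending seq[-1].  s is nonempty under the guard, so s[0] / s[-1] cannot
-- raise; their pyGet? is totalised with .getD 0 (unreachable default).
def licStepA (gap : Int) (st : Int × List Int) (x : Int) : Int × List Int :=
  (x, if x - st.1 > gap then st.2 ++ [st.1] else st.2)

def last_in_clusters (seq : List Int) (gap : Int) : List Int :=
  if seq.length == 0 then seq
  else
    let s := PySem.List.sorted (PySem.Set.ofList seq) (fun x => x) false
    let st := s.foldl (licStepA gap) ((PySem.List.pyGet? s 0).getD 0, [])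
    st.2 ++ [(PySem.List.pyGet? s (-1)).getD 0]

-- ===== PORT B =====
-- B: dedup+sort, group into clusters (state = (finished clusters, current cluster),
-- current cluster always nonempty so c[-1] is totalised with getLastD 0), then map
-- each cluster to its last element.
def licStepB (gap : Int) (st : List (List Int) × List Int) (x : Int) :
    List (List Int) × List Int :=
  if x - st.2.getLastD 0 > gap then (st.1 ++ [st.2], [x]) else (st.1, st.2 ++ [x])

def last_in_clusters_alt (seq : List Int) (gap : Int) : List Int :=
  if seq.length == 0 then seq
  else
    let s := PySem.List.sorted (PySem.Set.ofList seq) (fun x => x) false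
    let first := (PySem.List.pyGet? s 0).getD 0
    let st := (PySem.List.slice s (some 1) none).foldl (licStepB gap) ([], [first])
    (st.1 ++ [st.2]).map (fun c => c.getLastD 0)

-- ===== PRECONDITION & SPEC =====
-- On nonempty seq with gap < 0, A's loop compares the first element with itself
-- (0 > gap fires) and returns the smallest element twice; B returns each cluster's
-- last element once, which is intended (the docstring promises each number at most once).
def D_last_in_clusters (seq : List Int) (gap : Int) : Prop := seq ≠ [] ∧ gap < 0
instance (seq : List Int) (gap : Int) : Decidable (D_last_in_clusters seq gap) := by
  unfold D_last_in_clusters; infer_instance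

def Spec_last_in_clusters (seq : List Int) (gap : Int) (out : List Int) : Prop :=
  ¬ D_last_in_clusters seq gap → out = last_in_clusters_alt seq gap
instance (seq : List Int) (gap : Int) (out : List Int) : Decidable (Spec_last_in_clusters seq gap out) := by
  unfold Spec_last_in_clusters; infer_instance

def pvDiffWitness_last_in_clusters : List Int × Int := ([5], -1)
def pvDiffWitnessOut_last_in_clusters : (List Int) × (List Int) := ([5, 5], [5])

-- ===== CLAIM (what is proved, stated in full; the proofs are below) =====
def Claim_unchanged_last_in_clusters : Prop := ∀ (seq : List Int) (gap : Int), Dom_last_in_clusters seq gap → Spec_last_in_clusters seq gap (last_in_clusters seq gap)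
def Claim_changed_last_in_clusters : Prop := Dom_last_in_clusters (pvDiffWitness_last_in_clusters.1) (pvDiffWitness_last_in_clusters.2) ∧ D_last_in_clusters (pvDiffWitness_last_in_clusters.1) (pvDiffWitness_last_in_clusters.2) ∧ last_in_clusters (pvDiffWitness_last_in_clusters.1) (pvDiffWitness_last_in_clusters.2) = pvDiffWitnessOut_last_in_clusters.1 ∧ last_in_clusters_alt (pvDiffWitness_last_in_clusters.1) (pvDiffWitness_last_in_clusters.2) = pvDiffWitnessOut_last_in_clusters.2 ∧ pvDiffWitnessOut_last_in_clusters.1 ≠ pvDiffWitnessOut_last_in_clusters.2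
def Claim_exact_last_in_clusters : Prop := ∀ (seq : List Int) (gap : Int), Dom_last_in_clusters seq gap → D_last_in_clusters seq gap → last_in_clusters seq gap ≠ last_in_clusters_alt seq gap

-- ===== LEMMAS AND PROOFS =====

-- A's fold with accumulator acc is acc ++ the fold with accumulator [].
theorem licA_acc (gap : Int) (t : List Int) :
    ∀ (p : Int) (acc : List Int),
      (t.foldl (licStepA gap) (p, acc)).2 = acc ++ (t.foldl (licStepA gap) (p, [])).2 := by
  induction t with
  | nil => intro p acc; simp
  | cons x t ih =>
      intro p acc
      simp only [List.foldl_cons, licStepA]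
      split_ifs
      · simp only [List.nil_append]
        rw [ih x (acc ++ [p]), ih x [p], List.append_assoc]
      · rw [ih x acc]

-- B's fold only appends to the finished-clusters list.
theorem licB_fin (gap : Int) (t : List Int) :
    ∀ (fin : List (List Int)) (cur : List Int),
      t.foldl (licStepB gap) (fin, cur)
        = (fin ++ (t.foldl (licStepB gap) ([], cur)).1,
           (t.foldl (licStepB gap) ([], cur)).2) := by
  induction t with
  | nil => intro fin cur; simp
  | cons x t ih =>
      intro fin cur
      simp only [List.foldl_cons, licStepB]
      split_ifs
      · simp only [List.nil_append]
        rw [ih (fin ++ [cur]) [x], ih [cur] [x]]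
        simp
      · exact ih fin (cur ++ [x])

-- Core invariant: the lasts of B's clusters are A's emitted prevs plus the last element.
theorem licMain (gap : Int) (t : List Int) :
    ∀ (p : Int) (cur : List Int), cur ≠ [] → cur.getLastD 0 = p →
      ((t.foldl (licStepB gap) ([], cur)).1 ++ [(t.foldl (licStepB gap) ([], cur)).2]).map
          (fun c => c.getLastD 0)
        = (t.foldl (licStepA gap) (p, [])).2 ++ [t.getLastD p] := by
  induction t with
  | nil =>
      intro p cur _ hlast
      rw [List.getLastD_eq_getLast?] at hlast
      simp [hlast]
  | cons x t ih =>
      intro p cur hne hlast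
      have hlast' := hlast
      rw [List.getLastD_eq_getLast?] at hlast'
      simp only [List.foldl_cons, licStepB, licStepA, hlast]
      split_ifs with h
      · simp only [List.nil_append]
        rw [licB_fin gap t [cur] [x], licA_acc gap t x [p], List.getLastD_cons]
        simp only [List.cons_append, List.nil_append, List.map_cons]
        rw [ih x [x] (by simp) (by simp)]
        simp [hlast']
      · rw [List.getLastD_cons]
        exact ih x (cur ++ [x]) (by simp) (by simp)

-- getLast?/getLastD bridge for the last element of a nonempty list.
theorem licLast (t : List Int) : ∀ (s0 : Int), ((s0 :: t).getLast?).getD 0 = t.getLastD s0 := by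
  induction t with
  | nil => intro s0; simp
  | cons x t ih =>
      intro s0
      rw [List.getLast?_cons_cons, List.getLastD_cons]
      exact ih x

-- sorted(set(seq)) is nonempty when seq is.
theorem licSortedNe (seq : List Int) (hne : seq ≠ []) :
    PySem.List.sorted (PySem.Set.ofList seq) (fun x => x) false ≠ [] := by
  intro h
  have hlen := PySem.List.length_sorted (PySem.Set.ofList seq) (fun x : Int => x) false
  rw [h] at hlen
  rcases List.exists_mem_of_ne_nil seq hne with ⟨a, ha⟩
  have hmem := (PySem.Set.mem_ofList seq a).2 ha
  have hnilset : PySem.Set.ofList seq = [] := List.eq_nil_of_length_eq_zero hlen.symm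
  simp [hnilset] at hmem

-- ===== VERDICT (by name: the statement is the Claim_ definition above) =====
theorem last_in_clusters_spec : Claim_unchanged_last_in_clusters := by
  intro seq gap _ hD
  unfold last_in_clusters last_in_clusters_alt
  by_cases hnil : seq = []
  · simp [hnil]
  · have hlen : (seq.length == 0) = false := by simp [hnil]
    have hgap : 0 ≤ gap := by
      by_contra hlt
      exact hD ⟨hnil, by omega⟩
    simp only [hlen, Bool.false_eq_true, if_false]
    obtain ⟨s0, t, hst⟩ := List.exists_cons_of_ne_nil (licSortedNe seq hnil)
    rw [hst]
    simp only [PySem.List.pyGet?_zero_cons, Option.getD_some, PySem.List.pyGet?_neg_one,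
      PySem.List.slice_from_one, List.tail_cons]
    rw [licLast t s0]
    rw [licMain gap t s0 [s0] (by simp) (by simp)]
    simp only [List.foldl_cons, licStepA, sub_self]
    have h0 : ¬ ((0 : Int) > gap) := by omega
    simp [h0]

theorem last_in_clusters_changed : Claim_changed_last_in_clusters := by
  unfold Claim_changed_last_in_clusters; decide

theorem last_in_clusters_tight : Claim_exact_last_in_clusters := by
  intro seq gap _ hD
  obtain ⟨hnil, hgap⟩ := hD
  unfold last_in_clusters last_in_clusters_alt
  have hlen : (seq.length == 0) = false := by simp [hnil]
  simp only [hlen, Bool.false_eq_true, if_false]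
  obtain ⟨s0, t, hst⟩ := List.exists_cons_of_ne_nil (licSortedNe seq hnil)
  rw [hst]
  simp only [PySem.List.pyGet?_zero_cons, Option.getD_some, PySem.List.pyGet?_neg_one,
    PySem.List.slice_from_one, List.tail_cons]
  rw [licLast t s0]
  rw [licMain gap t s0 [s0] (by simp) (by simp)]
  simp only [List.foldl_cons, licStepA, sub_self]
  have h0 : ((0 : Int) > gap) := by omega
  simp only [h0, if_true, List.nil_append]
  rw [licA_acc gap t s0 [s0]]
  intro hcontra
  have hlens := congrArg List.length hcontra
  simp only [List.length_append, List.length_cons, List.length_nil] at hlens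
  omega
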